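-- pv_equiv track=rewrite | github.com/marcellfurler/Laporan-Praktikum-Semester-2 | Blajar LAb/Latihan/string.py | kalimat_spok
-- ===== SOURCE A (Python) =====
-- def kalimat_spok(kalimat):
--     #daftar huruf alay
--     normal="aAiIeEsSgGoOBb"
--     upnormal="44113355990086"
--     hasil=""
--     for karakter in kalimat:
--         if karakter in normal:
--             #direplace
--             ind3x=normal.index(karakter)
--             hasil=hasil+upnormal[ind3x]
--         else:
--             hasil=hasil+karakter
--     return hasil
-- ===== SOURCE B (Python) =====
-- def kalimat_spok(kalimat):
--     # Staged passes: one whole-string replace per alay letter.  Correct because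
--     # the replacement digits never occur among the source letters, so later
--     # passes cannot touch characters produced by earlier ones.
--     for src, dst in zip("aAiIeEsSgGoOBb", "44113355990086"):
--         kalimat = kalimat.replace(src, dst)
--     return kalimat
-- ===== Notes on version B (the rewrite author's own statement) =====
-- stated objective: idiomatic
-- what changed: Replaced the single per-character loop (membership test + .index scan + concatenation) by 14 staged whole-string replace passes, one per mapped letter; correct because the inserted digits are never source letters.
import Mathlib
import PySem

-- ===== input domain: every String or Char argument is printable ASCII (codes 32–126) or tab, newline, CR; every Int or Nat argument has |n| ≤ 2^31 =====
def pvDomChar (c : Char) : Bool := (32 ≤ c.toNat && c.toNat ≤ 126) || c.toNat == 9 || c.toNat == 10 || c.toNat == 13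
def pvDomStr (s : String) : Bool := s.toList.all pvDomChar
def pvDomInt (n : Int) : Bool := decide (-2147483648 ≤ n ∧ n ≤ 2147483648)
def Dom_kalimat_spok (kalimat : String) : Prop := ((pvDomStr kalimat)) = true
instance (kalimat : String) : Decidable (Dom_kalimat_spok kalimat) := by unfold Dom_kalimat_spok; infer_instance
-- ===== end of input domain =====

-- B replaces A's single per-character loop (membership test + .index scan + concatenation)
-- by 14 staged whole-string replace passes, one per mapped letter (idiomatic staged form;
-- correct because the inserted digits are never source letters).

-- ===== PORT A =====
-- literal transliteration of A: a fold over the characters appending one piece each;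
-- 'karakter in normal' is List.contains, 'normal.index(karakter)' is PySem.List.index?
-- (guarded by the membership test, so the none branch is unreachable) and
-- 'upnormal[ind3x]' is the (always in-range) getElem?.
def kalimat_spok (kalimat : String) : String :=
  let normal : List Char := "aAiIeEsSgGoOBb".toList
  let upnormal : List Char := "44113355990086".toList
  String.ofList (kalimat.toList.foldl (fun hasil karakter =>
    if normal.contains karakter then
      hasil ++ ((PySem.List.index? normal karakter).elim [] (fun ind3x => (upnormal[ind3x]?).toList))
    else
      hasil ++ [karakter]) [])

-- ===== PORT B =====
-- Source B: for src, dst in zip(...): kalimat = kalimat.replace(src, dst); return kalimat.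
-- The zip of the two literal strings is the literal pair list; each pass is PySem.Str.replace.
def kalimat_spok_alt (kalimat : String) : String :=
  ("aAiIeEsSgGoOBb".toList.zip "44113355990086".toList).foldl
    (fun s p => PySem.Str.replace s (String.ofList [p.1]) (String.ofList [p.2])) kalimat

-- ===== PRECONDITION & SPEC =====
def Spec_kalimat_spok (kalimat : String) (out : String) : Prop := out = kalimat_spok_alt kalimat
instance (kalimat : String) (out : String) : Decidable (Spec_kalimat_spok kalimat out) := by unfold Spec_kalimat_spok; infer_instance

-- ===== CLAIM (what is proved, stated in full; the proofs are below) =====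
def Claim_equal_kalimat_spok : Prop := ∀ (kalimat : String), Dom_kalimat_spok kalimat → Spec_kalimat_spok kalimat (kalimat_spok kalimat)

-- ===== LEMMAS AND PROOFS =====

-- single-character subst function
def pvSub (o n c : Char) : Char := if c == o then n else c

-- Chars.replace.go for a single-character pattern is a map, given enough fuel
theorem pv_go_single (o n : Char) :
    ∀ (fuel : Nat) (l acc : List Char), l.length ≤ fuel →
      PySem.Chars.replace.go [o] [n] fuel l acc = acc.reverse ++ l.map (pvSub o n) := by
  intro fuel
  induction fuel with
  | zero =>
    intro l acc h
    have : l = [] := List.eq_nil_of_length_eq_zero (Nat.le_zero.mp h)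
    subst this
    simp [PySem.Chars.replace.go]
  | succ f ih =>
    intro l acc h
    cases l with
    | nil => simp [PySem.Chars.replace.go]
    | cons c t =>
      by_cases hc : o = c
      · subst hc
        simp only [PySem.Chars.replace.go, List.isPrefixOf, beq_self_eq_true, Bool.true_and,
          if_pos]
        rw [ih _ _ (by simpa using Nat.le_of_succ_le_succ h)]
        simp [pvSub]
      · have hb : ([o].isPrefixOf (c :: t)) = false := by
          simp [List.isPrefixOf, hc]
        simp only [PySem.Chars.replace.go, hb, Bool.false_eq_true, if_false]
        rw [ih _ _ (Nat.le_of_succ_le_succ h)]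
        have : pvSub o n c = c := by simp [pvSub, Ne.symm hc]
        simp [this]

theorem pv_replace_single (l : List Char) (o n : Char) :
    PySem.Chars.replace l [o] [n] = l.map (pvSub o n) := by
  have h := pv_go_single o n l.length l [] (le_refl _)
  simpa [PySem.Chars.replace] using h

-- the table-lookup function A's loop realises per character
def pvTab (c : Char) : Char :=
  (PySem.Dict.ofList ("aAiIeEsSgGoOBb".toList.zip "44113355990086".toList)).getD c c

-- pvTab is the identity off the 14 mapped letters
theorem pvTab_eq_self (c : Char)
    (h1 : c ≠ 'a') (h2 : c ≠ 'A') (h3 : c ≠ 'i') (h4 : c ≠ 'I') (h5 : c ≠ 'e') (h6 : c ≠ 'E')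
    (h7 : c ≠ 's') (h8 : c ≠ 'S') (h9 : c ≠ 'g') (h10 : c ≠ 'G') (h11 : c ≠ 'o') (h12 : c ≠ 'O')
    (h13 : c ≠ 'B') (h14 : c ≠ 'b') : pvTab c = c := by
  unfold pvTab
  rw [show PySem.Dict.ofList ("aAiIeEsSgGoOBb".toList.zip "44113355990086".toList) =
      PySem.Dict.mk [('a','4'),('A','4'),('i','1'),('I','1'),('e','3'),('E','3'),('s','5'),('S','5'),('g','9'),('G','9'),('o','0'),('O','0'),('B','8'),('b','6')] from by decide]
  simp [PySem.Dict.getD, PySem.Dict.get?_mk_cons, beq_iff_eq,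
    Ne.symm h1, Ne.symm h2, Ne.symm h3, Ne.symm h4, Ne.symm h5, Ne.symm h6, Ne.symm h7,
    Ne.symm h8, Ne.symm h9, Ne.symm h10, Ne.symm h11, Ne.symm h12, Ne.symm h13, Ne.symm h14]
  have he : ({ items := [] } : PySem.Dict Char Char) = PySem.Dict.empty := rfl
  rw [he, PySem.Dict.get?_empty]
  rfl

-- the piece A appends for one character equals the table lookup for that character
theorem kalimat_spok_piece_eq (c : Char) :
    (if (['a','A','i','I','e','E','s','S','g','G','o','O','B','b'].contains c) then
      ((PySem.List.index? ['a','A','i','I','e','E','s','S','g','G','o','O','B','b'] c).elim []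
        (fun i => (['4','4','1','1','3','3','5','5','9','9','0','0','8','6'][i]?).toList))
    else [c])
    = [pvTab c] := by
  by_cases h : c ∈ ['a','A','i','I','e','E','s','S','g','G','o','O','B','b']
  · fin_cases h <;> decide
  · rw [if_neg (by simpa using h)]
    simp only [List.mem_cons, List.not_mem_nil, or_false] at h
    push Not at h
    obtain ⟨h1,h2,h3,h4,h5,h6,h7,h8,h9,h10,h11,h12,h13,h14⟩ := h
    rw [pvTab_eq_self c h1 h2 h3 h4 h5 h6 h7 h8 h9 h10 h11 h12 h13 h14]

-- A's accumulating loop computes map pvTab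
theorem kalimat_spok_loop_eq (l : List Char) (acc : List Char) :
    l.foldl (fun hasil karakter =>
      if (['a','A','i','I','e','E','s','S','g','G','o','O','B','b'].contains karakter) then
        hasil ++ ((PySem.List.index? ['a','A','i','I','e','E','s','S','g','G','o','O','B','b'] karakter).elim []
          (fun i => (['4','4','1','1','3','3','5','5','9','9','0','0','8','6'][i]?).toList))
      else hasil ++ [karakter]) acc
    = acc ++ l.map pvTab := by
  induction l generalizing acc with
  | nil => simp
  | cons c l ih =>
    simp only [List.foldl_cons, List.map_cons]
    rw [ih, ← apply_ite (acc ++ ·), kalimat_spok_piece_eq c]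
    simp

-- the 14 staged substitutions compose pointwise to the table lookup
theorem pv_comp_eq_tab (c : Char) :
    pvSub 'b' '6' (pvSub 'B' '8' (pvSub 'O' '0' (pvSub 'o' '0' (pvSub 'G' '9' (pvSub 'g' '9'
      (pvSub 'S' '5' (pvSub 's' '5' (pvSub 'E' '3' (pvSub 'e' '3' (pvSub 'I' '1' (pvSub 'i' '1'
        (pvSub 'A' '4' (pvSub 'a' '4' c))))))))))))) = pvTab c := by
  by_cases h : c ∈ ['a','A','i','I','e','E','s','S','g','G','o','O','B','b']
  · fin_cases h <;> decide
  · simp only [List.mem_cons, List.not_mem_nil, or_false] at h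
    push Not at h
    obtain ⟨h1,h2,h3,h4,h5,h6,h7,h8,h9,h10,h11,h12,h13,h14⟩ := h
    have hs : ∀ o n, c ≠ o → pvSub o n c = c := fun o n hne => by simp [pvSub, hne]
    rw [hs _ _ h1, hs _ _ h2, hs _ _ h3, hs _ _ h4, hs _ _ h5, hs _ _ h6, hs _ _ h7,
      hs _ _ h8, hs _ _ h9, hs _ _ h10, hs _ _ h11, hs _ _ h12, hs _ _ h13, hs _ _ h14,
      pvTab_eq_self c h1 h2 h3 h4 h5 h6 h7 h8 h9 h10 h11 h12 h13 h14]

-- B's 14 replace passes compute map pvTab too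
set_option maxHeartbeats 1000000 in
theorem kalimat_spok_alt_eq_map (s : String) :
    (kalimat_spok_alt s).toList = s.toList.map pvTab := by
  have hz : ("aAiIeEsSgGoOBb".toList.zip "44113355990086".toList)
      = [('a','4'),('A','4'),('i','1'),('I','1'),('e','3'),('E','3'),('s','5'),('S','5'),
         ('g','9'),('G','9'),('o','0'),('O','0'),('B','8'),('b','6')] := by decide
  unfold kalimat_spok_alt
  rw [hz]
  simp only [List.foldl_cons, List.foldl_nil]
  simp only [PySem.Str.toList_replace, String.toList_ofList, pv_replace_single]
  induction s.toList with
  | nil => rfl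
  | cons c t ih =>
    simp only [List.map_cons]
    rw [ih, pv_comp_eq_tab c]

-- ===== VERDICT (by name: the statement is the Claim_ definition above) =====
theorem kalimat_spok_spec : Claim_equal_kalimat_spok := by
  intro kalimat _
  unfold Spec_kalimat_spok
  have hn : "aAiIeEsSgGoOBb".toList = ['a','A','i','I','e','E','s','S','g','G','o','O','B','b'] := by decide
  have hu : "44113355990086".toList = ['4','4','1','1','3','3','5','5','9','9','0','0','8','6'] := by decide
  have hA : kalimat_spok kalimat = String.ofList (kalimat.toList.map pvTab) := by
    unfold kalimat_spok
    simp only [hn, hu]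
    rw [kalimat_spok_loop_eq]
    simp
  have hB : (kalimat_spok_alt kalimat).toList = kalimat.toList.map pvTab :=
    kalimat_spok_alt_eq_map kalimat
  rw [hA, ← hB, String.ofList_toList]
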